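-- pv_equiv track=rewrite | github.com/idontcare1996/Lossy-Counter | a3_88702.py | LossyCounting
-- ===== SOURCE A (Python) =====
-- def LossyCounting (k, datastream):
--
--     lista = {}          # Dicionário Vazio
--     current_window = 1  # nº da janela
--     n_items = 0         # Nº. de items processados
--     #epsylon = 0.2       # User specified error threshhold
--
--     for each_item in datastream:
--
--         x=each_item     # Coloca em x o item a ler
--         n_items+=1      # Aumenta o contador
--
--
--         """ Inserção """
--         if ( x in lista):
--             previous_value = lista.get(x,"none")
--             new_value = [previous_value[0]+1,previous_value[1]]
--             lista[x]= new_value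
--
--         else:
--             new_list = [1,(current_window)-1]
--             lista[x]=new_list
--
--         #print ("lista: ",lista)
--
--         """ Remoção """
--         if ((n_items % k )==0):
--
--             L = list(lista.keys())
--             for each_element in L:
--                 i = each_element
--                 previous_value = list(lista.get(i,"none"))
--                 freq = previous_value[0]
--                 delta = previous_value[1]
--                 #print (previous_value,freq,delta)
--                 if (freq + delta <= current_window):
--                     del lista[i]
--             current_window+=1;
--
--     return lista
-- ===== SOURCE B (Python) =====
-- def LossyCounting(k, datastream):
--     # Window-at-a-time: count each k-sized chunk locally, merge the counts in
--     # one shot, then prune with a dict comprehension (no per-item window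
--     # bookkeeping, no key-list rescan with deletes).
--     table = {}
--     window = 1
--     start = 0
--     while start < len(datastream):
--         chunk = datastream[start:start + k]
--         counts = {}
--         for x in chunk:
--             counts[x] = counts.get(x, 0) + 1
--         for x, c in counts.items():
--             if x in table:
--                 table[x][0] += c
--             else:
--                 table[x] = [c, window - 1]
--         if len(chunk) == k:
--             table = {x: v for x, v in table.items() if v[0] + v[1] > window}
--             window += 1
--         start += k
--     return table
-- ===== Notes on version B (the rewrite author's own statement) =====
-- stated objective: alternative
-- what changed: B processes the stream one k-sized window at a time: it counts each chunk into a local dict, merges those counts into the table in one shot, and prunes with a dict comprehension, instead of A's per-item counter bookkeeping and full key-list rescan with in-place deletes at every window boundary; Pre_ restricts to positive window sizes k >= 1 (the natural domain: k = 0 makes A raise ZeroDivisionError, and a negative window size is meaningless -- A only returns something there by accident of the modulo trigger, while B's chunked loop does not terminate).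
-- outside the precondition, e.g. on LossyCounting(-2, [1, 1]): A returns {1: [2, 0]}, B does not finish within the time limit; on LossyCounting(0, []): A returns {}, B returns {}
import Mathlib
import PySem

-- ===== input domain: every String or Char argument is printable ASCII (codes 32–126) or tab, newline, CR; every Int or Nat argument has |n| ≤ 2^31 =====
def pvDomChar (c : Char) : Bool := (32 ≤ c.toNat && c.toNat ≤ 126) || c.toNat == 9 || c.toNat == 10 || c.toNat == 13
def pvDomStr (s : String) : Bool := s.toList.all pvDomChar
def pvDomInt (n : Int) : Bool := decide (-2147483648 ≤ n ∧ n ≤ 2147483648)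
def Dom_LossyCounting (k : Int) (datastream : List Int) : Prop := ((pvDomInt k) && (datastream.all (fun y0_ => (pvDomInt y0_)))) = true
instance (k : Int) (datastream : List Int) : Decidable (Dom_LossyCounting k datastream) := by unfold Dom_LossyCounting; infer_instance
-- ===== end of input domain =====

-- B processes the stream window by window (count the chunk, merge once, prune by a
-- dict comprehension) instead of A's per-item updates with a key-list rescan-and-delete;
-- same results on positive window sizes, alternative structure (objective: alternative).

-- ===== PORT A =====
-- insertion block of A's loop ("Inserção"); lista.get(x,"none") is only read when x is
-- a key, so the default [] is never observed
def lcIns (current_window : Int) (lista : PySem.Dict Int (List Int)) (x : Int) : PySem.Dict Int (List Int) :=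
  if lista.contains x then
    let previous_value := lista.getD x []
    let new_value := [PySem.List.pyGetD previous_value 0 0 + 1, PySem.List.pyGetD previous_value 1 0]
    lista.insert x new_value
  else
    let new_list := [1, current_window - 1]
    lista.insert x new_list

-- removal block of A's loop ("Remoção"): iterate over a copy of the keys, delete in place
def lcPruneStep (current_window : Int) (d : PySem.Dict Int (List Int)) (i : Int) : PySem.Dict Int (List Int) :=
  let previous_value := d.getD i []
  let freq := PySem.List.pyGetD previous_value 0 0
  let delta := PySem.List.pyGetD previous_value 1 0
  if freq + delta ≤ current_window then d.erase i else d

def lcPrune (current_window : Int) (lista : PySem.Dict Int (List Int)) : PySem.Dict Int (List Int) :=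
  lista.keys.foldl (lcPruneStep current_window) lista

-- one iteration of A's for-loop; state = (lista, current_window, n_items)
def lcStepA (k : Int) (st : PySem.Dict Int (List Int) × Int × Int) (each_item : Int) :
    PySem.Dict Int (List Int) × Int × Int :=
  let n_items := st.2.2 + 1
  let lista := lcIns st.2.1 st.1 each_item
  if PySem.Int.mod n_items k = 0 then
    (lcPrune st.2.1 lista, st.2.1 + 1, n_items)
  else
    (lista, st.2.1, n_items)

def LossyCounting (k : Int) (datastream : List Int) : List (Int × List Int) :=
  (datastream.foldl (lcStepA k) (PySem.Dict.empty, 1, 0)).1.items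

-- ===== PORT B =====
-- merge one (item, chunk-count) pair into the table ("table[x][0] += c" / "table[x] = [c, window-1]")
def lcMerge (window : Int) (t : PySem.Dict Int (List Int)) (p : Int × Int) : PySem.Dict Int (List Int) :=
  if t.contains p.1 then
    let v := t.getD p.1 []
    t.insert p.1 [PySem.List.pyGetD v 0 0 + p.2, PySem.List.pyGetD v 1 0]
  else
    t.insert p.1 [p.2, window - 1]

-- count the chunk locally, then merge the counts
def lcAltChunk (window : Int) (table : PySem.Dict Int (List Int)) (chunk : List Int) :
    PySem.Dict Int (List Int) :=
  let counts := chunk.foldl (fun c x => c.insert x (c.getD x 0 + 1)) PySem.Dict.empty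
  counts.items.foldl (lcMerge window) table

-- the comprehension's filter: v[0] + v[1] > window
def lcKeep (window : Int) (p : Int × List Int) : Bool :=
  window < PySem.List.pyGetD p.2 0 0 + PySem.List.pyGetD p.2 1 0

-- the while loop over chunk starts (w = the chunk size k, a positive int under Pre_);
-- the dict comprehension over .items (distinct keys) is exactly Dict.mk of the filtered items list
def lcAltGo (w : Nat) : Int → PySem.Dict Int (List Int) → List Int → PySem.Dict Int (List Int)
  | _, table, [] => table
  | window, table, x :: rest =>
    let chunk := x :: rest.take (w - 1)
    let table1 := lcAltChunk window table chunk
    if chunk.length = w then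
      lcAltGo w (window + 1) (PySem.Dict.mk (table1.items.filter (lcKeep window))) (rest.drop (w - 1))
    else
      lcAltGo w window table1 (rest.drop (w - 1))
  termination_by _ _ l => l.length
  decreasing_by all_goals (simp only [List.length_drop, List.length_cons]; omega)

def LossyCounting_alt (k : Int) (datastream : List Int) : List (Int × List Int) :=
  (lcAltGo k.toNat 1 PySem.Dict.empty datastream).items

-- ===== PRECONDITION & SPEC =====
-- Pre_ restricts to positive window sizes, the function's natural domain: k = 0 makes A
-- raise ZeroDivisionError at the first item, and for a (meaningless) negative window size
-- A returns something only by accident of its modulo trigger while B's chunked loop does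
-- not terminate, so those inputs are excluded.
def Pre_LossyCounting (k : Int) (datastream : List Int) : Prop := 1 ≤ k
instance (k : Int) (datastream : List Int) : Decidable (Pre_LossyCounting k datastream) := by
  unfold Pre_LossyCounting; infer_instance
def pvWitness_LossyCounting : Int × List Int := (2, [1, 1, 2, 3, 1])

def Spec_LossyCounting (k : Int) (datastream : List Int) (out : List (Int × List Int)) : Prop := out = LossyCounting_alt k datastream
instance (k : Int) (datastream : List Int) (out : List (Int × List Int)) : Decidable (Spec_LossyCounting k datastream out) := by unfold Spec_LossyCounting; infer_instance

-- ===== CLAIM (what is proved, stated in full; the proofs are below) =====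
def Claim_equal_LossyCounting : Prop := ∀ (k : Int) (datastream : List Int), Dom_LossyCounting k datastream → Pre_LossyCounting k datastream → Spec_LossyCounting k datastream (LossyCounting k datastream)

-- ===== LEMMAS AND PROOFS =====

-- the value lcIns inserts (both branches of lcIns insert at key x)
def lcVal (current_window : Int) (lista : PySem.Dict Int (List Int)) (x : Int) : List Int :=
  if lista.contains x then
    [PySem.List.pyGetD (lista.getD x []) 0 0 + 1, PySem.List.pyGetD (lista.getD x []) 1 0]
  else
    [1, current_window - 1]

theorem lcIns_eq_insert (w : Int) (d : PySem.Dict Int (List Int)) (x : Int) :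
    lcIns w d x = d.insert x (lcVal w d x) := by
  unfold lcIns lcVal; split <;> rfl

-- unfolding equations for the while-loop recursion
theorem lcAltGo_nil (w : Nat) (window : Int) (table : PySem.Dict Int (List Int)) :
    lcAltGo w window table [] = table := by
  rw [lcAltGo.eq_def]

theorem lcAltGo_cons (w : Nat) (window : Int) (table : PySem.Dict Int (List Int)) (x : Int) (rest : List Int) :
    lcAltGo w window table (x :: rest) =
      (if (x :: rest.take (w - 1)).length = w then
        lcAltGo w (window + 1)
          (PySem.Dict.mk ((lcAltChunk window table (x :: rest.take (w - 1))).items.filter (lcKeep window)))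
          (rest.drop (w - 1))
      else
        lcAltGo w window (lcAltChunk window table (x :: rest.take (w - 1))) (rest.drop (w - 1))) := by
  rw [lcAltGo.eq_def]

-- "x bumped by n" (identity for n = 0)
def lcBump (x : Int) (n : Int) (d : PySem.Dict Int (List Int)) : PySem.Dict Int (List Int) :=
  if n = 0 then d
  else d.insert x [PySem.List.pyGetD (d.getD x []) 0 0 + n, PySem.List.pyGetD (d.getD x []) 1 0]

theorem dict_insert_insert (d : PySem.Dict Int (List Int)) (x : Int) (v u : List Int) :
    (d.insert x v).insert x u = d.insert x u := by
  apply PySem.Dict.ext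
  by_cases h : d.contains x = true
  · rw [PySem.Dict.items_insert, PySem.Dict.items_insert, PySem.Dict.items_insert,
      if_pos h, if_pos h, if_pos (by simpa using PySem.Dict.contains_insert_self d x v)]
    rw [List.map_map]
    apply List.map_congr_left
    intro p _
    by_cases hp : p.1 = x <;> simp [hp]
  · rw [PySem.Dict.items_insert, PySem.Dict.items_insert, PySem.Dict.items_insert,
      if_neg h, if_neg h, if_pos (by simpa using PySem.Dict.contains_insert_self d x v)]
    rw [List.map_append]
    have hmap : d.items.map (fun p => if (p.1 == x) = true then (x, u) else p) = d.items := by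
      conv_rhs => rw [← List.map_id d.items]
      apply List.map_congr_left
      intro p hp
      have hnx : ¬ (p.1 == x) = true := by
        intro hc
        apply h
        simp only [PySem.Dict.contains, List.any_eq_true]
        exact ⟨p, hp, hc⟩
      simp [hnx]
    rw [hmap]
    simp

theorem dict_insert_comm (d : PySem.Dict Int (List Int)) {x y : Int} (a b : List Int)
    (hx : d.contains x = true) (hne : x ≠ y) :
    (d.insert x a).insert y b = (d.insert y b).insert x a := by
  apply PySem.Dict.ext
  have hxy : (d.insert y b).contains x = true := by
    rw [PySem.Dict.contains_insert]; simp [hx]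
  have hyx : (d.insert x a).contains y = (d.contains y) := by
    rw [PySem.Dict.contains_insert]; simp [Ne.symm hne]
  by_cases hy : d.contains y = true
  · rw [PySem.Dict.items_insert ((d.insert x a)) y b, hyx, if_pos hy,
      PySem.Dict.items_insert d x a, if_pos hx,
      PySem.Dict.items_insert (d.insert y b) x a, if_pos hxy,
      PySem.Dict.items_insert d y b, if_pos hy]
    rw [List.map_map, List.map_map]
    apply List.map_congr_left
    intro p _
    by_cases hp1 : p.1 = x
    · simp [hp1, hne, Ne.symm hne]
    · by_cases hp2 : p.1 = y <;> simp [hp1, hp2, hne, Ne.symm hne]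
  · rw [PySem.Dict.items_insert ((d.insert x a)) y b, hyx, if_neg hy,
      PySem.Dict.items_insert d x a, if_pos hx,
      PySem.Dict.items_insert (d.insert y b) x a, if_pos hxy,
      PySem.Dict.items_insert d y b, if_neg hy]
    rw [List.map_append]
    simp only [List.map_cons, List.map_nil]
    have : ((y, b).1 == x) = false := by simp [Ne.symm hne]
    simp [this]

theorem pyGetD_pair (a b d0 : Int) :
    PySem.List.pyGetD [a, b] 0 d0 = a ∧ PySem.List.pyGetD [a, b] 1 d0 = b := by
  constructor <;> rfl

-- lcMerge with count 1 + c is lcIns followed by a bump of c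
theorem merge_eq_bump (w : Int) (d : PySem.Dict Int (List Int)) (x c : Int) :
    lcMerge w d (x, 1 + c) = lcBump x c (lcIns w d x) := by
  by_cases h : d.contains x = true
  · have hins : lcIns w d x = d.insert x [PySem.List.pyGetD (d.getD x []) 0 0 + 1,
        PySem.List.pyGetD (d.getD x []) 1 0] := by
      simp [lcIns, h]
    have hmer : lcMerge w d (x, 1 + c) = d.insert x [PySem.List.pyGetD (d.getD x []) 0 0 + (1 + c),
        PySem.List.pyGetD (d.getD x []) 1 0] := by
      simp [lcMerge, h]
    by_cases hc : c = 0
    · subst hc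
      rw [hmer, hins]
      simp [lcBump]
    · rw [hmer]
      simp only [lcBump, if_neg hc]
      rw [hins, PySem.Dict.getD_insert_self, dict_insert_insert]
      rw [(pyGetD_pair (PySem.List.pyGetD (d.getD x []) 0 0 + 1) (PySem.List.pyGetD (d.getD x []) 1 0) 0).1]
      rw [(pyGetD_pair (PySem.List.pyGetD (d.getD x []) 0 0 + 1) (PySem.List.pyGetD (d.getD x []) 1 0) 0).2]
      have harith : PySem.List.pyGetD (d.getD x []) 0 0 + (1 + c) = PySem.List.pyGetD (d.getD x []) 0 0 + 1 + c := by ring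
      rw [harith]
  · have h' : d.contains x = false := by simpa using h
    have hins : lcIns w d x = d.insert x [1, w - 1] := by
      simp [lcIns, h']
    have hmer : lcMerge w d (x, 1 + c) = d.insert x [1 + c, w - 1] := by
      simp [lcMerge, h']
    by_cases hc : c = 0
    · subst hc
      rw [hmer, hins]
      simp [lcBump]
    · rw [hmer]
      simp only [lcBump, if_neg hc]
      rw [hins, PySem.Dict.getD_insert_self, dict_insert_insert]
      rw [(pyGetD_pair (1 : Int) (w - 1) 0).1, (pyGetD_pair (1 : Int) (w - 1) 0).2]

-- bumping x right after an insertion at x absorbs into a bigger bump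
theorem bump_ins (w : Int) (d : PySem.Dict Int (List Int)) (x : Int) (c : Nat)
    (h : d.contains x = true) :
    lcBump x (c : Int) (lcIns w d x) = lcBump x ((c : Int) + 1) d := by
  have hins : lcIns w d x = d.insert x [PySem.List.pyGetD (d.getD x []) 0 0 + 1,
      PySem.List.pyGetD (d.getD x []) 1 0] := by
    simp [lcIns, h]
  have hc1 : ((c : Int) + 1) ≠ 0 := by omega
  by_cases hc : (c : Int) = 0
  · rw [hc, hins]
    simp [lcBump]
  · simp only [lcBump, if_neg hc, if_neg hc1]
    rw [hins, PySem.Dict.getD_insert_self, dict_insert_insert]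
    rw [(pyGetD_pair (PySem.List.pyGetD (d.getD x []) 0 0 + 1) (PySem.List.pyGetD (d.getD x []) 1 0) 0).1]
    rw [(pyGetD_pair (PySem.List.pyGetD (d.getD x []) 0 0 + 1) (PySem.List.pyGetD (d.getD x []) 1 0) 0).2]
    have harith : PySem.List.pyGetD (d.getD x []) 0 0 + 1 + (c : Int) = PySem.List.pyGetD (d.getD x []) 0 0 + ((c : Int) + 1) := by ring
    rw [harith]

-- bump at x commutes with lcIns at y ≠ x when x is already a key
theorem bump_comm (w : Int) (d : PySem.Dict Int (List Int)) {x y : Int} (c : Int)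
    (hx : d.contains x = true) (hne : x ≠ y) :
    lcBump x c (lcIns w d y) = lcIns w (lcBump x c d) y := by
  by_cases hc : c = 0
  · simp [lcBump, hc]
  · rw [lcIns_eq_insert, lcIns_eq_insert]
    simp only [lcBump, if_neg hc]
    have hg : (d.insert y (lcVal w d y)).getD x [] = d.getD x [] := by
      rw [PySem.Dict.getD_insert]
      simp [hne]
    rw [hg]
    have hval : lcVal w (d.insert x [PySem.List.pyGetD (d.getD x []) 0 0 + c, PySem.List.pyGetD (d.getD x []) 1 0]) y = lcVal w d y := by
      unfold lcVal
      rw [PySem.Dict.contains_insert, PySem.Dict.getD_insert]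
      simp [Ne.symm hne]
    rw [hval]
    exact (dict_insert_comm d _ _ hx hne).symm

-- hoist all later occurrences of x (already a key) into one bump
theorem foldl_ins_filter (w : Int) (x : Int) :
    ∀ (xs : List Int) (d : PySem.Dict Int (List Int)), d.contains x = true →
    xs.foldl (lcIns w) d =
      (xs.filter (fun y => !(y == x))).foldl (lcIns w) (lcBump x (xs.count x : Int) d) := by
  intro xs
  induction xs with
  | nil => intro d _; simp [lcBump]
  | cons y ys ih =>
    intro d hd
    by_cases hyx : y = x
    · subst hyx
      rw [List.foldl_cons]
      rw [ih (lcIns w d y) (by rw [lcIns_eq_insert]; exact PySem.Dict.contains_insert_self d y _)]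
      rw [bump_ins w d y _ hd]
      have hcnt : ((ys.count y : Int) + 1) = (((y :: ys).count y : Nat) : Int) := by
        rw [List.count_cons_self]; push_cast; ring
      rw [hcnt]
      have : (y :: ys).filter (fun z => !(z == y)) = ys.filter (fun z => !(z == y)) := by
        simp
      rw [this]
    · rw [List.foldl_cons]
      rw [ih (lcIns w d y) (by rw [lcIns_eq_insert, PySem.Dict.contains_insert]; simp [hd])]
      rw [bump_comm w d _ hd (fun h => hyx h.symm)]
      have hcnt : (y :: ys).count x = ys.count x := by
        rw [List.count_cons_of_ne hyx]
      rw [hcnt]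
      have : (y :: ys).filter (fun z => !(z == x)) = y :: ys.filter (fun z => !(z == x)) := by
        simp [hyx]
      rw [this, List.foldl_cons]

-- Set.ofList, peeled one element at a time
theorem foldl_add_cons (x : Int) :
    ∀ (xs s : List Int), x ∉ s →
    List.foldl PySem.Set.add (x :: s) xs =
      x :: List.foldl PySem.Set.add s (xs.filter (fun y => !(y == x))) := by
  intro xs
  induction xs with
  | nil => intro s _; simp
  | cons y ys ih =>
    intro s hs
    by_cases hyx : y = x
    · subst hyx
      rw [List.foldl_cons, PySem.Set.add_of_mem (List.mem_cons_self ..)]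
      rw [ih s hs]
      have hfil : (y :: ys).filter (fun z => !(z == y)) = ys.filter (fun z => !(z == y)) := by
        simp
      rw [hfil]
    · rw [List.foldl_cons]
      have hfil : (y :: ys).filter (fun z => !(z == x)) = y :: ys.filter (fun z => !(z == x)) := by
        simp [hyx]
      rw [hfil, List.foldl_cons]
      by_cases hmem : y ∈ s
      · rw [PySem.Set.add_of_mem (List.mem_cons_of_mem _ hmem), PySem.Set.add_of_mem hmem]
        exact ih s hs
      · have hmx : y ∉ x :: s := by
          intro hy
          rcases List.mem_cons.mp hy with h | h
          · exact hyx h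
          · exact hmem h
        rw [PySem.Set.add_of_not_mem hmx, PySem.Set.add_of_not_mem hmem, List.cons_append]
        apply ih
        intro hx
        rcases List.mem_append.mp hx with h | h
        · exact hs h
        · exact hyx (List.mem_singleton.mp h).symm

theorem ofList_cons (x : Int) (xs : List Int) :
    PySem.Set.ofList (x :: xs) = x :: PySem.Set.ofList (xs.filter (fun y => !(y == x))) := by
  unfold PySem.Set.ofList
  rw [List.foldl_cons]
  have h0 : PySem.Set.add PySem.Set.empty x = [x] := by
    rw [PySem.Set.add_of_not_mem (by simp [PySem.Set.empty])]
    rfl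
  rw [h0]
  exact foldl_add_cons x xs [] (by simp)

-- the central counting lemma: A's per-item inserts over a chunk = B's counter merge
theorem chunk_counter (w : Int) :
    ∀ (n : Nat) (l : List Int), l.length ≤ n → ∀ (d : PySem.Dict Int (List Int)),
    l.foldl (lcIns w) d = (PySem.Dict.counter l).items.foldl (lcMerge w) d := by
  intro n
  induction n with
  | zero =>
    intro l hl d
    have : l = [] := List.eq_nil_of_length_eq_zero (Nat.le_zero.mp hl)
    subst this
    rfl
  | succ n ih =>
    intro l hl d
    match l with
    | [] => rfl
    | x :: xs =>
      rw [PySem.Dict.items_counter, ofList_cons, List.map_cons, List.foldl_cons]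
      have hcnt0 : ((x :: xs).count x : Int) = 1 + (xs.count x : Int) := by
        rw [List.count_cons_self]; push_cast; ring
      rw [List.foldl_cons, hcnt0, merge_eq_bump]
      have hmapc : (PySem.Set.ofList (xs.filter (fun y => !(y == x)))).map
            (fun kk => (kk, ((x :: xs).count kk : Int)))
          = (PySem.Set.ofList (xs.filter (fun y => !(y == x)))).map
            (fun kk => (kk, ((xs.filter (fun y => !(y == x))).count kk : Int))) := by
        apply List.map_congr_left
        intro kk hk
        have hk' : kk ∈ xs.filter (fun y => !(y == x)) := (PySem.Set.mem_ofList _ _).mp hk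
        have hkx : ¬ (kk == x) = true := by
          have := List.of_mem_filter hk'
          simpa using this
        have h1 : (x :: xs).count kk = xs.count kk := by
          have hxk : ¬ x = kk := fun h => hkx (by simp [h])
          rw [List.count_cons_of_ne hxk]
        have h2 : (xs.filter (fun y => !(y == x))).count kk = xs.count kk :=
          List.count_filter (by simpa using hkx)
        rw [h1, h2]
      rw [hmapc, ← PySem.Dict.items_counter]
      rw [← ih (xs.filter (fun y => !(y == x)))
        (by have := List.length_filter_le (fun y => !(y == x)) xs; simp at hl ⊢; omega)]
      rw [foldl_ins_filter w x xs (lcIns w d x)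
        (by rw [lcIns_eq_insert]; exact PySem.Dict.contains_insert_self d x _)]

-- keys of a dict built from filtered items stay distinct
theorem nodup_keys_mk_filter (d : PySem.Dict Int (List Int)) (p : Int × List Int → Bool)
    (h : d.keys.Nodup) : (PySem.Dict.mk (d.items.filter p)).keys.Nodup := by
  rw [PySem.Dict.keys_mk]
  have h' : (d.items.map (fun x => x.1)).Nodup := h
  exact List.Sublist.nodup
    (List.Sublist.map (fun (x : Int × List Int) => x.1)
      (List.filter_sublist : List.Sublist (List.filter p d.items) d.items)) h'

-- the removal rescan is a filter of the items
theorem prune_aux (w : Int) :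
    ∀ (L : List Int) (d : PySem.Dict Int (List Int)), d.keys.Nodup →
    L.foldl (lcPruneStep w) d
    = PySem.Dict.mk (d.items.filter (fun p => if p.1 ∈ L then lcKeep w p else true)) := by
  intro L
  induction L with
  | nil =>
    intro d _
    have hp : (fun (p : Int × List Int) => if p.1 ∈ ([] : List Int) then lcKeep w p else true)
        = fun _ => true := by
      funext p; simp
    rw [List.foldl_nil, hp, List.filter_true]
  | cons i L' ih =>
    intro d hd
    rw [List.foldl_cons]
    simp only [lcPruneStep]
    by_cases hcond : PySem.List.pyGetD (d.getD i []) 0 0 + PySem.List.pyGetD (d.getD i []) 1 0 ≤ w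
    · rw [if_pos hcond]
      have herase : (d.erase i) = PySem.Dict.mk (d.items.filter (fun p => !(p.1 == i))) := rfl
      have hnd : (d.erase i).keys.Nodup := by
        rw [herase]; exact nodup_keys_mk_filter d _ hd
      rw [ih _ hnd, herase]
      apply PySem.Dict.ext
      show ((d.items.filter (fun p => !(p.1 == i))).filter (fun p => if p.1 ∈ L' then lcKeep w p else true))
          = d.items.filter (fun p => if p.1 ∈ i :: L' then lcKeep w p else true)
      rw [List.filter_filter]
      apply List.filter_congr
      intro p hp
      by_cases hpi : p.1 = i
      · have hpv : p.2 = d.getD i [] := by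
          have hmem : (p.1, p.2) ∈ d.items := hp
          rw [hpi] at hmem
          exact (PySem.Dict.getD_of_mem_items d hmem hd []).symm
        have hkeep : lcKeep w p = false := by
          simp only [lcKeep, hpv, decide_eq_false_iff_not, not_lt]
          exact hcond
        simp [hpi, hkeep, List.mem_cons]
      · by_cases hpl : p.1 ∈ L' <;> simp [hpi, hpl, List.mem_cons]
    · rw [if_neg hcond]
      rw [ih _ hd]
      apply PySem.Dict.ext
      show d.items.filter (fun p => if p.1 ∈ L' then lcKeep w p else true)
          = d.items.filter (fun p => if p.1 ∈ i :: L' then lcKeep w p else true)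
      apply List.filter_congr
      intro p hp
      by_cases hpi : p.1 = i
      · have hpv : p.2 = d.getD i [] := by
          have hmem : (p.1, p.2) ∈ d.items := hp
          rw [hpi] at hmem
          exact (PySem.Dict.getD_of_mem_items d hmem hd []).symm
        have hkeep : lcKeep w p = true := by
          simp only [lcKeep, hpv, decide_eq_true_eq]
          omega
        simp [hpi, hkeep, List.mem_cons]
      · by_cases hpl : p.1 ∈ L' <;> simp [hpi, hpl, List.mem_cons]

theorem prune_eq_filter (w : Int) (d : PySem.Dict Int (List Int)) (hd : d.keys.Nodup) :
    lcPrune w d = PySem.Dict.mk (d.items.filter (lcKeep w)) := by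
  unfold lcPrune
  rw [prune_aux w d.keys d hd]
  congr 1
  apply List.filter_congr
  intro p hp
  have hk : p.1 ∈ d.keys := by
    show p.1 ∈ d.items.map (fun x => x.1)
    exact List.mem_map_of_mem hp
  simp [hk]

-- lcIns preserves distinctness of keys through a fold
theorem nodup_keys_foldl_lcIns (w : Int) (l : List Int) (d : PySem.Dict Int (List Int))
    (h : d.keys.Nodup) : (l.foldl (lcIns w) d).keys.Nodup := by
  have hfun : lcIns w = fun d x => d.insert x (lcVal w d x) := by
    funext d x; exact lcIns_eq_insert w d x
  rw [hfun]
  exact PySem.Dict.nodup_keys_foldl_insert l _ d h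

-- A's loop over a stretch with no removal trigger is just the inserts
theorem stepA_no_trigger (k w : Int) :
    ∀ (c : List Int) (d : PySem.Dict Int (List Int)) (nit : Int),
    (∀ j : Nat, j < c.length → PySem.Int.mod (nit + (j : Int) + 1) k ≠ 0) →
    c.foldl (lcStepA k) (d, w, nit) = (c.foldl (lcIns w) d, w, nit + (c.length : Int)) := by
  intro c
  induction c with
  | nil => intro d nit _; simp
  | cons z zs ih =>
    intro d nit h
    rw [List.foldl_cons]
    have h0 : PySem.Int.mod (nit + 1) k ≠ 0 := by
      have := h 0 (by simp)
      simpa using this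
    have hstep : lcStepA k (d, w, nit) z = (lcIns w d z, w, nit + 1) := by
      simp only [lcStepA]
      rw [if_neg h0]
    rw [hstep, ih (lcIns w d z) (nit + 1) (fun j hj => by
      have hh := h (j + 1) (by simp at hj ⊢; omega)
      have he : nit + 1 + (j : Int) + 1 = nit + ((j + 1 : Nat) : Int) + 1 := by push_cast; ring
      rw [he]
      exact hh)]
    rw [List.foldl_cons, List.length_cons]
    have harith : nit + 1 + (zs.length : Int) = nit + ((zs.length + 1 : Nat) : Int) := by push_cast; ring
    rw [harith]

-- A's loop over a full chunk: inserts, then one prune at the end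
theorem stepA_chunk (k w : Int) :
    ∀ (c : List Int) (d : PySem.Dict Int (List Int)) (nit : Int), c ≠ [] →
    (∀ j : Nat, j + 1 < c.length → PySem.Int.mod (nit + (j : Int) + 1) k ≠ 0) →
    PySem.Int.mod (nit + (c.length : Int)) k = 0 →
    c.foldl (lcStepA k) (d, w, nit) =
      (lcPrune w (c.foldl (lcIns w) d), w + 1, nit + (c.length : Int)) := by
  intro c
  induction c with
  | nil => intro d nit h; exact absurd rfl h
  | cons z zs ih =>
    intro d nit _ hno htrig
    match zs with
    | [] =>
      simp only [List.foldl_cons, List.foldl_nil]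
      have h0 : PySem.Int.mod (nit + 1) k = 0 := by
        simpa using htrig
      simp only [lcStepA]
      rw [if_pos h0]
      simp
    | z2 :: t =>
      rw [List.foldl_cons]
      have h0 : PySem.Int.mod (nit + 1) k ≠ 0 := by
        have := hno 0 (by simp)
        simpa using this
      have hstep : lcStepA k (d, w, nit) z = (lcIns w d z, w, nit + 1) := by
        simp only [lcStepA]
        rw [if_neg h0]
      rw [hstep]
      rw [ih (lcIns w d z) (nit + 1) (by simp)
        (fun j hj => by
          have hh := hno (j + 1) (by simp at hj ⊢; omega)
          have he : nit + 1 + (j : Int) + 1 = nit + ((j + 1 : Nat) : Int) + 1 := by push_cast; ring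
          rw [he]
          exact hh)
        (by
          have he : nit + 1 + ((z2 :: t).length : Int) = nit + (((z :: z2 :: t).length : Nat) : Int) := by
            simp only [List.length_cons]
            push_cast
            ring
          rw [he]
          exact htrig)]
      simp only [List.foldl_cons, List.length_cons]
      have harith : nit + 1 + ((t.length + 1 : Nat) : Int) = nit + ((t.length + 1 + 1 : Nat) : Int) := by push_cast; ring
      rw [harith]

-- divisibility helper: mod n k = 0 iff |k| divides n
theorem mod_zero_iff_natAbs_dvd (n k : Int) : PySem.Int.mod n k = 0 ↔ ((k.natAbs : Int)) ∣ n := by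
  rw [PySem.Int.mod_eq_zero_iff_dvd]
  exact (Int.natAbs_dvd).symm

-- the main invariant: from a window boundary, A's fold and B's chunk recursion agree
theorem main_inv (k : Int) (hk : k ≠ 0) :
    ∀ (N : Nat) (ds : List Int), ds.length ≤ N →
    ∀ (d : PySem.Dict Int (List Int)) (w nit : Int),
    ((k.natAbs : Int)) ∣ nit → d.keys.Nodup →
    (ds.foldl (lcStepA k) (d, w, nit)).1 = lcAltGo k.natAbs w d ds := by
  intro N
  induction N with
  | zero =>
    intro ds hds d w nit _ _
    have : ds = [] := List.eq_nil_of_length_eq_zero (Nat.le_zero.mp hds)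
    subst this
    rw [lcAltGo_nil]
    rfl
  | succ N ih =>
    intro ds hds d w nit hdvd hnd
    match ds with
    | [] => rw [lcAltGo_nil]; rfl
    | x :: rest =>
      have hm : 1 ≤ k.natAbs := by
        have := Int.natAbs_pos.mpr hk
        omega
      set m := k.natAbs with hmdef
      have hsplit : x :: rest = (x :: rest.take (m - 1)) ++ rest.drop (m - 1) := by
        simp [List.take_append_drop]
      by_cases hfull : m - 1 ≤ rest.length
      · -- full chunk
        have hclen : (x :: rest.take (m - 1)).length = m := by
          simp [List.length_take]
          omega
        have hnotrig : ∀ j : Nat, j + 1 < (x :: rest.take (m - 1)).length →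
            PySem.Int.mod (nit + (j : Int) + 1) k ≠ 0 := by
          intro j hj hmod
          rw [mod_zero_iff_natAbs_dvd] at hmod
          have hdj : ((m : Int)) ∣ ((j : Int) + 1) := by
            have hsub := Int.dvd_sub hmod hdvd
            have he : nit + (j : Int) + 1 - nit = (j : Int) + 1 := by ring
            rwa [he] at hsub
          have hle : ((m : Int)) ≤ (j : Int) + 1 := Int.le_of_dvd (by omega) hdj
          rw [hclen] at hj
          omega
        have htrig : PySem.Int.mod (nit + ((x :: rest.take (m - 1)).length : Int)) k = 0 := by
          rw [mod_zero_iff_natAbs_dvd, hclen]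
          exact Int.dvd_add hdvd dvd_rfl
        conv_lhs => rw [hsplit]
        rw [List.foldl_append]
        rw [stepA_chunk k w _ d nit (by simp) hnotrig htrig]
        have hDnd : ((x :: rest.take (m - 1)).foldl (lcIns w) d).keys.Nodup :=
          nodup_keys_foldl_lcIns w _ d hnd
        rw [prune_eq_filter w _ hDnd]
        rw [ih (rest.drop (m - 1))
          (by simp only [List.length_cons, List.length_drop] at hds ⊢; omega)
          (PySem.Dict.mk (((x :: rest.take (m - 1)).foldl (lcIns w) d).items.filter (lcKeep w))) (w + 1)
          (nit + ((x :: rest.take (m - 1)).length : Int))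
          (by rw [hclen]; exact Int.dvd_add hdvd dvd_rfl)
          (nodup_keys_mk_filter _ _ hDnd)]
        rw [lcAltGo_cons, if_pos hclen]
        have hchunk : lcAltChunk w d (x :: rest.take (m - 1)) = (x :: rest.take (m - 1)).foldl (lcIns w) d := by
          simp only [lcAltChunk]
          rw [PySem.Dict.foldl_insert_getD_add_one_eq_counter]
          exact (chunk_counter w (x :: rest.take (m - 1)).length _ le_rfl d).symm
        rw [hchunk]
      · -- short final chunk: no trigger at all
        have hshort : rest.length < m - 1 := by omega
        have htake : rest.take (m - 1) = rest := List.take_of_length_le (by omega)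
        have hdrop : rest.drop (m - 1) = [] := List.drop_eq_nil_of_le (by omega)
        have hnotrig : ∀ j : Nat, j < (x :: rest).length →
            PySem.Int.mod (nit + (j : Int) + 1) k ≠ 0 := by
          intro j hj hmod
          rw [mod_zero_iff_natAbs_dvd] at hmod
          have hdj : ((m : Int)) ∣ ((j : Int) + 1) := by
            have hsub := Int.dvd_sub hmod hdvd
            have he : nit + (j : Int) + 1 - nit = (j : Int) + 1 := by ring
            rwa [he] at hsub
          have hle : ((m : Int)) ≤ (j : Int) + 1 := Int.le_of_dvd (by omega) hdj
          simp at hj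
          omega
        rw [stepA_no_trigger k w (x :: rest) d nit hnotrig]
        rw [lcAltGo_cons, htake, hdrop]
        rw [if_neg (show ¬ ((x :: rest).length = m) by simp only [List.length_cons]; omega)]
        rw [lcAltGo_nil]
        have hchunk : lcAltChunk w d (x :: rest) = (x :: rest).foldl (lcIns w) d := by
          simp only [lcAltChunk]
          rw [PySem.Dict.foldl_insert_getD_add_one_eq_counter]
          exact (chunk_counter w (x :: rest).length _ le_rfl d).symm
        rw [hchunk]

-- ===== VERDICT (by name: the statement is the Claim_ definition above) =====
theorem LossyCounting_spec : Claim_equal_LossyCounting := by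
  intro k ds _ hpre
  unfold Spec_LossyCounting LossyCounting LossyCounting_alt
  have hkn : k.toNat = k.natAbs := by
    unfold Pre_LossyCounting at hpre
    omega
  rw [hkn]
  congr 1
  exact main_inv k (by unfold Pre_LossyCounting at hpre; omega) ds.length ds le_rfl
    PySem.Dict.empty 1 0 (dvd_zero _) PySem.Dict.nodup_keys_empty
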